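-- pv_equiv track=rewrite | github.com/PeepalCapital/Project-Euler | 92_Euler.py | count_termination
-- ===== SOURCE A (Python) =====
-- def square_digit(n):
--     a = str(n)
--     sum_square_a = 0
--     for i in range (0, len(a)):
--         sq_digit = int(a[i]) * int(a[i])
--         sum_square_a = sum_square_a + sq_digit
--     return sum_square_a
--
-- def count_termination(n):
--     if n == 1:
--         return 1
--     if n == 89:
--         return 89
--     else:
--         a = square_digit(n)
--         return count_termination(a)
-- ===== SOURCE B (Python) =====
-- def square_digit(n):
--     return sum(int(c) * int(c) for c in str(n))
--
-- def count_termination(n):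
--     m = n
--     while m != 1 and m != 89:
--         m = square_digit(m)
--     return m
-- ===== Notes on version B (the rewrite author's own statement) =====
-- stated objective: idiomatic
-- what changed: Replaces the tail-recursive chain-following (and the index-loop digit-square helper) with an explicit while loop maintaining the current chain value, and a sum-over-characters comprehension for the digit squares.
-- outside the precondition, e.g. on count_termination(0): A raises RecursionError, B does not finish within the time limit; on count_termination(-5): A raises ValueError, B raises ValueError
import Mathlib
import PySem

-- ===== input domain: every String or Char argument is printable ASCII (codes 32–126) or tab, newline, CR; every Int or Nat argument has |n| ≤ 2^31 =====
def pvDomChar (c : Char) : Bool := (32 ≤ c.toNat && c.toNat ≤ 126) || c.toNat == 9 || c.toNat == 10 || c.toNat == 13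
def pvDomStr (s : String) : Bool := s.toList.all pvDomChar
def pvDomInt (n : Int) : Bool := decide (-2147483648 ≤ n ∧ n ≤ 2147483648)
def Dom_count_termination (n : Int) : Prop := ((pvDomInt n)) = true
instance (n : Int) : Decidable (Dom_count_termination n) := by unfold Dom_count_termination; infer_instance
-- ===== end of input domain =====

-- B rewrites the tail-recursive chain-following as an explicit while loop over the current
-- chain value, with a sum-comprehension digit-square helper (idiomatic; same cost).
-- Both chain loops are made total with a fuel counter (1000, never exhausted on inputs in
-- Dom ∩ Pre_; on exhaustion both return the current value) — a totalization guard, not an algorithm change.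

-- ===== PORT A =====
-- square_digit: int(a[i]) is exact via ofChars? on each character; .getD 0 is unreachable
-- for n ≥ 1 (every character of str(n) is then a digit); the '-' of a negative n would
-- make Python raise ValueError, which Pre_ excludes.
def square_digit (n : Int) : Int :=
  let a : List Char := PySem.Int.toChars n
  (PySem.List.pyRange 0 (PySem.List.len a) 1).foldl
    (fun sum_square_a i =>
      sum_square_a +
        ((PySem.Int.ofChars? [PySem.List.pyGetD a i ' ']).getD 0) *
          ((PySem.Int.ofChars? [PySem.List.pyGetD a i ' ']).getD 0)) 0

def count_termination_fuel : Nat → Int → Int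
  | 0, m => m
  | fuel+1, n =>
    if n = 1 then 1
    else if n = 89 then 89
    else count_termination_fuel fuel (square_digit n)

def count_termination (n : Int) : Int := count_termination_fuel 1000 n

-- ===== PORT B =====
def square_digit_alt (n : Int) : Int :=
  (((PySem.Int.toChars n).map
    (fun c => ((PySem.Int.ofChars? [c]).getD 0) * ((PySem.Int.ofChars? [c]).getD 0))).sum)

def count_termination_alt_loop : Nat → Int → Int
  | 0, m => m
  | fuel+1, m =>
    if m ≠ 1 ∧ m ≠ 89 then count_termination_alt_loop fuel (square_digit_alt m)
    else m

def count_termination_alt (n : Int) : Int := count_termination_alt_loop 1000 n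

-- ===== PRECONDITION & SPEC =====
-- Pre_ excludes n ≤ 0: Python A raises ValueError on negative n (int('-') in square_digit)
-- and recurses forever on n = 0 (RecursionError); B raises/hangs there too.
def Pre_count_termination (n : Int) : Prop := 1 ≤ n
instance (n : Int) : Decidable (Pre_count_termination n) := by unfold Pre_count_termination; infer_instance
def pvWitness_count_termination : Int := (7)
def Spec_count_termination (n : Int) (out : Int) : Prop := out = count_termination_alt n
instance (n : Int) (out : Int) : Decidable (Spec_count_termination n out) := by unfold Spec_count_termination; infer_instance

-- ===== CLAIM (what is proved, stated in full; the proofs are below) =====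
def Claim_equal_count_termination : Prop := ∀ (n : Int), Dom_count_termination n → Pre_count_termination n → Spec_count_termination n (count_termination n)

-- ===== LEMMAS AND PROOFS =====
theorem square_digit_eq (n : Int) : square_digit n = square_digit_alt n := by
  unfold square_digit_alt
  show (PySem.List.pyRange 0 (PySem.List.len (PySem.Int.toChars n)) 1).foldl
      (fun acc i => acc +
        ((PySem.Int.ofChars? [PySem.List.pyGetD (PySem.Int.toChars n) i ' ']).getD 0) *
          ((PySem.Int.ofChars? [PySem.List.pyGetD (PySem.Int.toChars n) i ' ']).getD 0)) 0 = _
  rw [PySem.List.foldl_pyRange_zero_pyGetD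
    (f := fun acc c => acc + ((PySem.Int.ofChars? [c]).getD 0) * ((PySem.Int.ofChars? [c]).getD 0))]
  generalize PySem.Int.toChars n = cs
  induction cs using List.reverseRecOn with
  | nil => simp
  | append_singleton xs x ih => simp [List.foldl_append, ih]

theorem loop_eq (fuel : Nat) (n : Int) :
    count_termination_fuel fuel n = count_termination_alt_loop fuel n := by
  induction fuel generalizing n with
  | zero => rfl
  | succ fuel ih =>
    simp only [count_termination_fuel, count_termination_alt_loop, square_digit_eq]
    by_cases h1 : n = 1
    · simp [h1]
    · by_cases h89 : n = 89
      · simp [h89]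
      · simp [h1, h89, ih]

-- ===== VERDICT (by name: the statement is the Claim_ definition above) =====
theorem count_termination_spec : Claim_equal_count_termination := by
  intro n _ _
  unfold Spec_count_termination count_termination count_termination_alt
  exact loop_eq 1000 n
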